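-- pv_equiv track=rewrite | github.com/ipdlbygi5/hacktoberithms | lookupprofile.py | look_up_profile
-- ===== SOURCE A (Python) =====
-- contacts = [
--     {
--         "firstName": "Akira",
--         "lastName": "Laine",
--         "number": "0543236543",
--         "likes": ["Pizza", "Coding", "Brownie Points"]
--     },
--     {
--         "firstName": "Harry",
--         "lastName": "Potter",
--         "number": "0994372684",
--         "likes": ["Hogwarts", "Magic", "Hagrid"]
--     },
--     {
--         "firstName": "Sherlock",
--         "lastName": "Holmes",
--         "number": "0487345643",
--         "likes": ["Intriguing Cases", "Violin"]
--     },
--     {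
--         "firstName": "Kristian",
--         "lastName": "Vos",
--         "number": "unknown",
--         "likes": ["JavaScript", "Gaming", "Foxes"]
--     }
-- ];
--
-- def look_up_profile(name, field):
--     x=0
--     y=0
--     if field == 'firstName':
--         x=1
--     if field == 'lastName':
--         x=1
--     if field == 'number':
--         x=1
--     if field == 'likes':
--         x=1
--     if x == 0:
--         return 'No such property'
--     for contact in contacts:
--         if contact['firstName'] == name:
--             y=1
--             break
--     if y == 0:
--         return 'No such contact'
--
--     return contact[field]
-- ===== SOURCE B (Python) =====
-- contacts = [
--     {
--         "firstName": "Akira",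
--         "lastName": "Laine",
--         "number": "0543236543",
--         "likes": ["Pizza", "Coding", "Brownie Points"]
--     },
--     {
--         "firstName": "Harry",
--         "lastName": "Potter",
--         "number": "0994372684",
--         "likes": ["Hogwarts", "Magic", "Hagrid"]
--     },
--     {
--         "firstName": "Sherlock",
--         "lastName": "Holmes",
--         "number": "0487345643",
--         "likes": ["Intriguing Cases", "Violin"]
--     },
--     {
--         "firstName": "Kristian",
--         "lastName": "Vos",
--         "number": "unknown",
--         "likes": ["JavaScript", "Gaming", "Foxes"]
--     }
-- ]
--
-- # One flat table keyed by (firstName, field); a miss is classified afterwards: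
-- # if the requested field occurs anywhere in the key space the name must be the
-- # culprit ('No such contact'), otherwise the field is ('No such property').
-- _TABLE = {(c["firstName"], f): v for c in contacts for f, v in c.items()}
--
-- def look_up_profile(name, field):
--     try:
--         return _TABLE[(name, field)]
--     except KeyError:
--         return 'No such contact' if any(f == field for _, f in _TABLE) else 'No such property'
-- ===== Notes on version B (the rewrite author's own statement) =====
-- stated objective: alternative
-- what changed: Replaces A's flag variables, four-if field validation and scan-with-break over contacts by one flat (firstName, field)->value table looked up exception-style; a miss is then classified by checking whether the field occurs in the key space at all ('No such contact') or nowhere ('No such property').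
import Mathlib
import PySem

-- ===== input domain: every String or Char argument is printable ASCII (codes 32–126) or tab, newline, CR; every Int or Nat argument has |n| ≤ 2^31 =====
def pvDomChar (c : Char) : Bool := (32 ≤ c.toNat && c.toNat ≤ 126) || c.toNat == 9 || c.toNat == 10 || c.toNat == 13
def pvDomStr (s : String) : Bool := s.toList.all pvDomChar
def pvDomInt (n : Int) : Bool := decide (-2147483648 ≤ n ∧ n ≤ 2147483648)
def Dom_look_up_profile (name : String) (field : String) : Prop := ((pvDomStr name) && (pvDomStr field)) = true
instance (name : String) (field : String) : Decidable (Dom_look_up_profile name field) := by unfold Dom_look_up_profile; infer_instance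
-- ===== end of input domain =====

-- B replaces A's flag variables, if-chain and scan-with-break by one flat (name, field)→value
-- table looked up exception-style, with a miss classified from the table's key space
-- (alternative decomposition; 'likes' values are lists of strings, outside Pre_, so the
-- string-valued ports carry the likes keys only in the key list, never a likes value).

-- ===== PORT A =====
-- each contact as a dict of its string-valued fields
def pvC1 : PySem.Dict String String :=
  PySem.Dict.ofList [("firstName", "Akira"), ("lastName", "Laine"), ("number", "0543236543")]
def pvC2 : PySem.Dict String String :=
  PySem.Dict.ofList [("firstName", "Harry"), ("lastName", "Potter"), ("number", "0994372684")]
def pvC3 : PySem.Dict String String :=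
  PySem.Dict.ofList [("firstName", "Sherlock"), ("lastName", "Holmes"), ("number", "0487345643")]
def pvC4 : PySem.Dict String String :=
  PySem.Dict.ofList [("firstName", "Kristian"), ("lastName", "Vos"), ("number", "unknown")]

def pvContacts : List (PySem.Dict String String) := [pvC1, pvC2, pvC3, pvC4]

-- the for/break loop: first contact whose 'firstName' equals name (y stays 0 ↔ none)
def pvFindLoop (cs : List (PySem.Dict String String)) (name : String) :
    Option (PySem.Dict String String) :=
  match cs with
  | [] => none
  | c :: rest => if PySem.Dict.getD c "firstName" "" == name then some c else pvFindLoop rest name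

def look_up_profile (name : String) (field : String) : String :=
  -- x = 0; the four ifs each set x = 1
  let x : Int := 0
  let x : Int := if field == "firstName" then 1 else x
  let x : Int := if field == "lastName" then 1 else x
  let x : Int := if field == "number" then 1 else x
  let x : Int := if field == "likes" then 1 else x
  if x == 0 then "No such property"
  else
    match pvFindLoop pvContacts name with
    | none => "No such contact"           -- y == 0
    | some contact => PySem.Dict.getD contact field ""

-- ===== PORT B =====
-- the flat table's string-valued entries ('likes' values are lists, excluded by Pre_)
def pvTable : PySem.Dict (String × String) String := PySem.Dict.ofList
  [(("Akira", "firstName"), "Akira"), (("Akira", "lastName"), "Laine"),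
   (("Akira", "number"), "0543236543"),
   (("Harry", "firstName"), "Harry"), (("Harry", "lastName"), "Potter"),
   (("Harry", "number"), "0994372684"),
   (("Sherlock", "firstName"), "Sherlock"), (("Sherlock", "lastName"), "Holmes"),
   (("Sherlock", "number"), "0487345643"),
   (("Kristian", "firstName"), "Kristian"), (("Kristian", "lastName"), "Vos"),
   (("Kristian", "number"), "unknown")]

-- the table's full key space, including the (list-valued) 'likes' keys
def pvAllKeys : List (String × String) :=
  [("Akira", "firstName"), ("Akira", "lastName"), ("Akira", "number"), ("Akira", "likes"),
   ("Harry", "firstName"), ("Harry", "lastName"), ("Harry", "number"), ("Harry", "likes"),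
   ("Sherlock", "firstName"), ("Sherlock", "lastName"), ("Sherlock", "number"), ("Sherlock", "likes"),
   ("Kristian", "firstName"), ("Kristian", "lastName"), ("Kristian", "number"), ("Kristian", "likes")]

def look_up_profile_alt (name : String) (field : String) : String :=
  match PySem.Dict.get? pvTable (name, field) with
  | some v => v                           -- the try body returned
  | none =>                               -- KeyError: classify the miss from the key space
    if pvAllKeys.any (fun k => k.2 == field) then "No such contact" else "No such property"

-- ===== PRECONDITION & SPEC =====
-- Pre_ excludes field = "likes" with a name present in the table: there Python A (and B)
-- return a list of strings, not a value of the declared str type.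
def Pre_look_up_profile (name : String) (field : String) : Prop :=
  ¬ (field = "likes" ∧ name ∈ ["Akira", "Harry", "Sherlock", "Kristian"])
instance (name : String) (field : String) : Decidable (Pre_look_up_profile name field) := by
  unfold Pre_look_up_profile; infer_instance

def pvWitness_look_up_profile : String × String := ("Harry", "number")

def Spec_look_up_profile (name : String) (field : String) (out : String) : Prop := out = look_up_profile_alt name field
instance (name : String) (field : String) (out : String) : Decidable (Spec_look_up_profile name field out) := by unfold Spec_look_up_profile; infer_instance

-- ===== CLAIM (what is proved, stated in full; the proofs are below) =====
def Claim_equal_look_up_profile : Prop := ∀ (name : String) (field : String), Dom_look_up_profile name field → Pre_look_up_profile name field → Spec_look_up_profile name field (look_up_profile name field)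

-- ===== LEMMAS AND PROOFS =====

-- A's loop, characterised as a nested if on name
def pvIdx (name : String) : Option (PySem.Dict String String) :=
  if "Akira" == name then some pvC1
  else if "Harry" == name then some pvC2
  else if "Sherlock" == name then some pvC3
  else if "Kristian" == name then some pvC4
  else none

theorem pv_loopA (name : String) : pvFindLoop pvContacts name = pvIdx name := rfl

theorem pvTableMk : pvTable = PySem.Dict.mk
    [(("Akira", "firstName"), "Akira"), (("Akira", "lastName"), "Laine"),
     (("Akira", "number"), "0543236543"),
     (("Harry", "firstName"), "Harry"), (("Harry", "lastName"), "Potter"),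
     (("Harry", "number"), "0994372684"),
     (("Sherlock", "firstName"), "Sherlock"), (("Sherlock", "lastName"), "Holmes"),
     (("Sherlock", "number"), "0487345643"),
     (("Kristian", "firstName"), "Kristian"), (("Kristian", "lastName"), "Vos"),
     (("Kristian", "number"), "unknown")] := by
  apply PySem.Dict.ext; rfl

-- for a valid string field, both sides with an unknown name
theorem pv_names (name field : String)
    (hA : ¬ ("Akira" = name)) (hH : ¬ ("Harry" = name))
    (hS : ¬ ("Sherlock" = name)) (hK : ¬ ("Kristian" = name))
    (hv : field = "firstName" ∨ field = "lastName" ∨ field = "number" ∨ field = "likes") :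
    look_up_profile name field = look_up_profile_alt name field := by
  rcases hv with h | h | h | h <;> subst h <;>
    simp [look_up_profile, look_up_profile_alt, pv_loopA, pvIdx, pvTableMk,
      PySem.Dict.get?, Prod.ext_iff, pvAllKeys, hA, hH, hS, hK]

theorem pv_eq_all (name field : String)
    (hpre : Pre_look_up_profile name field) :
    look_up_profile name field = look_up_profile_alt name field := by
  by_cases hf1 : field = "firstName"
  case pos =>
    subst hf1
    by_cases hA : "Akira" = name
    · subst hA; decide
    · by_cases hH : "Harry" = name
      · subst hH; decide
      · by_cases hS : "Sherlock" = name
        · subst hS; decide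
        · by_cases hK : "Kristian" = name
          · subst hK; decide
          · exact pv_names name _ hA hH hS hK (Or.inl rfl)
  case neg =>
  by_cases hf2 : field = "lastName"
  case pos =>
    subst hf2
    by_cases hA : "Akira" = name
    · subst hA; decide
    · by_cases hH : "Harry" = name
      · subst hH; decide
      · by_cases hS : "Sherlock" = name
        · subst hS; decide
        · by_cases hK : "Kristian" = name
          · subst hK; decide
          · exact pv_names name _ hA hH hS hK (Or.inr (Or.inl rfl))
  case neg =>
  by_cases hf3 : field = "number"
  case pos =>
    subst hf3
    by_cases hA : "Akira" = name
    · subst hA; decide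
    · by_cases hH : "Harry" = name
      · subst hH; decide
      · by_cases hS : "Sherlock" = name
        · subst hS; decide
        · by_cases hK : "Kristian" = name
          · subst hK; decide
          · exact pv_names name _ hA hH hS hK (Or.inr (Or.inr (Or.inl rfl)))
  case neg =>
  by_cases hf4 : field = "likes"
  case pos =>
    -- Pre_ rules out the four known names here
    subst hf4
    unfold Pre_look_up_profile at hpre
    simp only [not_and, List.mem_cons, List.not_mem_nil, not_or, or_false] at hpre
    obtain ⟨hA, hH, hS, hK⟩ := hpre trivial
    exact pv_names name _ (fun h => hA h.symm) (fun h => hH h.symm)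
      (fun h => hS h.symm) (fun h => hK h.symm) (Or.inr (Or.inr (Or.inr rfl)))
  case neg =>
    -- invalid field: A returns 'No such property'; B misses and finds no such key
    simp [look_up_profile, look_up_profile_alt, pvTableMk, PySem.Dict.get?,
      Prod.ext_iff, pvAllKeys, hf1, hf2, hf3, hf4,
      Ne.symm hf1, Ne.symm hf2, Ne.symm hf3, Ne.symm hf4]

-- ===== VERDICT (by name: the statement is the Claim_ definition above) =====
theorem look_up_profile_spec : Claim_equal_look_up_profile := by
  intro name field _ hpre
  exact pv_eq_all name field hpre
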